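-- pv_equiv track=rewrite | github.com/MatthieuBeukers/VIPSamplesheetChecker | VIPSamplesheet.py | get_hpo_terms
-- ===== SOURCE A (Python) =====
-- def get_hpo_terms(hpostring):
--     """Parses a string containing one or more HPO terms and save them in a structures way.
--
--     The terms are saved with the prefix as key. The prefix is for example the HPO part in HPO:123456.
--
--     Returns
--     -------
--     hpodata : dict of str
--         Dictionary of HPO terms per prefix
--     """
--     hpodata = {}
--     if hpostring != "":
--         hpoterms = hpostring.split(",")
--         for hpoterm in hpoterms:
--             hpotermchunks = hpoterm.split(":")
--             if hpotermchunks[0] not in hpodata: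
--                 hpodata[hpotermchunks[0]] = []
--             hpodata[hpotermchunks[0]].append(hpotermchunks[1])
--     return hpodata
-- ===== SOURCE B (Python) =====
-- def get_hpo_terms(hpostring):
--     """Parses a string containing one or more HPO terms and save them in a structures way.
--
--     Grouping by comprehension: build the (prefix, value) pair list once, then for each
--     first-occurrence-ordered distinct prefix collect its values with a filter pass.
--     """
--     if hpostring == "":
--         return {}
--     pairs = [(t.split(":")[0], t.split(":")[1]) for t in hpostring.split(",")]
--     return {p: [v for q, v in pairs if q == p] for p in dict.fromkeys(q for q, _ in pairs)}
-- ===== Notes on version B (the rewrite author's own statement) =====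
-- stated objective: alternative
-- what changed: Replaces the incremental dict mutation (membership test, insert-empty, append) with a declarative two-phase build: parse all (prefix, value) pairs once, dedup the prefixes in first-occurrence order, and build each group's value list by a filter comprehension over the pairs; Pre_ excludes only inputs where both raise IndexError (a comma-separated term without a colon).
import Mathlib
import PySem

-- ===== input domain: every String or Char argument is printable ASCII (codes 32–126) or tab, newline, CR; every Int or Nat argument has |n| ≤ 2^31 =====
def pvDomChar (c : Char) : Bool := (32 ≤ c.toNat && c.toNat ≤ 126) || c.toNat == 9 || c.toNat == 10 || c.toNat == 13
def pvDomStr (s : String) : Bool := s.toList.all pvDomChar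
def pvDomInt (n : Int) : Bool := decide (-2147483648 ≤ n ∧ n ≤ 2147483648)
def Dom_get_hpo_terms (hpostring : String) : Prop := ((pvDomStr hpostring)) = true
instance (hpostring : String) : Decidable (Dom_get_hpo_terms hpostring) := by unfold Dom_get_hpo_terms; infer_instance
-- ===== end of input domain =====

-- B groups by a declarative two-phase build (pair list, dedup'd prefixes, filter per prefix)
-- instead of A's incremental dict mutation; same values, no speed claim.

-- ===== PORT A =====
def get_hpo_terms (hpostring : String) : List (String × List String) :=
  let hpodata : PySem.Dict String (List String) := PySem.Dict.empty
  let hpodata :=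
    if hpostring ≠ "" then
      (((PySem.Str.split? hpostring ",").getD [])).foldl (fun hpodata hpoterm =>
        let hpotermchunks := ((PySem.Str.split? hpoterm ":").getD [])
        let hpodata :=
          if hpodata.contains (PySem.List.pyGetD hpotermchunks 0 "") then hpodata
          else hpodata.insert (PySem.List.pyGetD hpotermchunks 0 "") []
        -- hpodata[chunks[0]].append(chunks[1]); chunks[1] raises IndexError for a
        -- colon-less term — those inputs are excluded by Pre_, getD's default is never used there
        hpodata.modify (PySem.List.pyGetD hpotermchunks 0 "") []
          (fun l => l ++ [PySem.List.pyGetD hpotermchunks 1 ""])) hpodata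
    else hpodata
  hpodata.items

-- ===== PORT B =====
def get_hpo_terms_alt (hpostring : String) : List (String × List String) :=
  if hpostring == "" then []
  else
    let pairs := (((PySem.Str.split? hpostring ",").getD [])).map (fun t =>
      let c := ((PySem.Str.split? t ":").getD [])
      (PySem.List.pyGetD c 0 "", PySem.List.pyGetD c 1 ""))
    (PySem.List.dedup (pairs.map (fun p => p.1))).map
      (fun p => (p, (pairs.filter (fun q => q.1 == p)).map (fun q => q.2)))

-- ===== PRECONDITION & SPEC =====
-- Pre_ excludes exactly the inputs where Python A raises IndexError: a non-empty
-- hpostring one of whose comma-separated terms contains no colon.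
def Pre_get_hpo_terms (hpostring : String) : Prop :=
  hpostring = "" ∨ ∀ t ∈ ((PySem.Str.split? hpostring ",").getD []), 2 ≤ (((PySem.Str.split? t ":").getD [])).length
instance (hpostring : String) : Decidable (Pre_get_hpo_terms hpostring) := by unfold Pre_get_hpo_terms; infer_instance
def pvWitness_get_hpo_terms : String := "HPO:0001250,OMIM:613135,HPO:0004322"

def Spec_get_hpo_terms (hpostring : String) (out : List (String × List String)) : Prop := out = get_hpo_terms_alt hpostring
instance (hpostring : String) (out : List (String × List String)) : Decidable (Spec_get_hpo_terms hpostring out) := by unfold Spec_get_hpo_terms; infer_instance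

-- ===== CLAIM (what is proved, stated in full; the proofs are below) =====
def Claim_equal_get_hpo_terms : Prop := ∀ (hpostring : String), Dom_get_hpo_terms hpostring → Pre_get_hpo_terms hpostring → Spec_get_hpo_terms hpostring (get_hpo_terms hpostring)

-- ===== LEMMAS AND PROOFS =====

-- A's loop body (setdefault-style insert followed by append) equals a single modify with default []
theorem pv_step_eq (d : PySem.Dict String (List String)) (k : String) (f : List String → List String) :
    (if d.contains k then d else d.insert k []).modify k [] f = d.modify k [] f := by
  by_cases h : d.contains k = true
  · simp [h]
  · simp only [Bool.not_eq_true] at h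
    simp only [h, Bool.false_eq_true, ite_false]
    unfold PySem.Dict.modify
    rw [PySem.Dict.insert_insert_self, PySem.Dict.getD_insert_self,
      PySem.Dict.getD_of_not_contains (h := h)]

theorem pv_witness_ok : Dom_get_hpo_terms pvWitness_get_hpo_terms ∧ Pre_get_hpo_terms pvWitness_get_hpo_terms := by
  constructor <;> decide

-- ===== VERDICT (by name: the statement is the Claim_ definition above) =====
theorem get_hpo_terms_spec : Claim_equal_get_hpo_terms := by
  intro s _ _
  unfold Spec_get_hpo_terms get_hpo_terms get_hpo_terms_alt
  by_cases hs : s = ""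
  · simp [hs, PySem.Dict.empty]
  · have hbe : (s == "") = false := by simp [hs]
    simp only [hs, hbe, ne_eq, not_false_iff, if_true, Bool.false_eq_true, if_false]
    -- rewrite A's fold step into a plain modify, then into a fold over the pair list
    have hfun : (fun (hpodata : PySem.Dict String (List String)) (hpoterm : String) =>
        let hpotermchunks := ((PySem.Str.split? hpoterm ":").getD [])
        let hpodata :=
          if hpodata.contains (PySem.List.pyGetD hpotermchunks 0 "") then hpodata
          else hpodata.insert (PySem.List.pyGetD hpotermchunks 0 "") []
        hpodata.modify (PySem.List.pyGetD hpotermchunks 0 "") []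
          (fun l => l ++ [PySem.List.pyGetD hpotermchunks 1 ""]))
      = (fun (d : PySem.Dict String (List String)) (t : String) =>
          d.modify (PySem.List.pyGetD (((PySem.Str.split? t ":").getD [])) 0 "") []
            (fun l => l ++ [PySem.List.pyGetD (((PySem.Str.split? t ":").getD [])) 1 ""])) := by
      funext d t
      exact pv_step_eq d _ _
    rw [hfun]
    set pair : String → String × String := fun t =>
      (PySem.List.pyGetD (((PySem.Str.split? t ":").getD [])) 0 "",
       PySem.List.pyGetD (((PySem.Str.split? t ":").getD [])) 1 "") with hpair
    have hmap : (((PySem.Str.split? s ",").getD [])).foldl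
        (fun (d : PySem.Dict String (List String)) (t : String) =>
          d.modify (PySem.List.pyGetD (((PySem.Str.split? t ":").getD [])) 0 "") []
            (fun l => l ++ [PySem.List.pyGetD (((PySem.Str.split? t ":").getD [])) 1 ""])) PySem.Dict.empty
        = ((((PySem.Str.split? s ",").getD [])).map pair).foldl
            (fun (d : PySem.Dict String (List String)) (p : String × String) =>
              d.modify p.1 [] (fun l => l ++ [p.2])) PySem.Dict.empty := by
      rw [List.foldl_map]
    rw [hmap]
    set L : List (String × String) := (((PySem.Str.split? s ",").getD [])).map pair with hL
    set dStar : PySem.Dict String (List String) :=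
      L.foldl (fun d p => d.modify p.1 [] (fun l => l ++ [p.2])) PySem.Dict.empty with hd
    have hnd : dStar.keys.Nodup := by
      rw [hd]
      exact PySem.Dict.nodup_keys_foldl_modify_key L Prod.fst [] _ PySem.Dict.empty
        (by simp [PySem.Dict.keys_empty])
    have hkeys : dStar.keys = PySem.List.dedup (L.map (fun p => p.1)) := by
      rw [hd]
      rw [PySem.Dict.keys_foldl_modify_key]
      simp [PySem.Dict.keys_empty, PySem.Set.update_nil_left]
    rw [PySem.Dict.items_eq_map_keys dStar hnd [], hkeys]
    refine List.map_congr_left (fun k hk => ?_)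
    have hget : dStar.getD k [] = (L.filter (fun p => p.1 == k)).map (fun q => q.2) := by
      rw [hd, PySem.Dict.getD_foldl_modify_append]
      simp [PySem.Dict.getD_empty]
    rw [hget]
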